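-- pv_equiv track=rewrite | github.com/nityaattili/PolicyAgent-Agenthub | Agenthub-Policyagent/app/rag/ingest.py | _parse_metadata_and_body
-- ===== SOURCE A (Python) =====
-- def _parse_metadata_and_body(text: str):
--     """
--     Expected format in the top lines:
--     # Title
--     Classification: INTERNAL
--     AllowedRoles: employee, manager, hr
--     <blank line>
--     Body...
--     """
--     lines = [l.rstrip() for l in text.splitlines()]
--     title = lines[0].lstrip("#").strip() if lines else "Untitled"
--     classification = "INTERNAL"
--     allowed_roles = ["employee"]
--
--     for l in lines[:10]:
--         if l.lower().startswith("classification:"):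
--             classification = l.split(":", 1)[1].strip().upper()
--         if l.lower().startswith("allowedroles:"):
--             roles_str = l.split(":", 1)[1].strip()
--             allowed_roles = [r.strip() for r in roles_str.split(",") if r.strip()]
--
--     body = "\n".join(lines)
--     return title, classification, allowed_roles, body
-- ===== SOURCE B (Python) =====
-- def _parse_metadata_and_body(text: str):
--     """Index the header lines by their lowercased key, then look up the two fields."""
--     lines = [l.rstrip() for l in text.splitlines()]
--
--     meta = {}
--     for l in lines[:10]:
--         if ":" in l:
--             key, value = l.split(":", 1)
--             meta[key.lower()] = value.strip()
--
--     title = lines[0].lstrip("#").strip() if lines else "Untitled"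
--
--     if "classification" in meta:
--         classification = meta["classification"].upper()
--     else:
--         classification = "INTERNAL"
--
--     if "allowedroles" in meta:
--         allowed_roles = [r.strip() for r in meta["allowedroles"].split(",") if r.strip()]
--     else:
--         allowed_roles = ["employee"]
--
--     return title, classification, allowed_roles, "\n".join(lines)
-- ===== Notes on version B (the rewrite author's own statement) =====
-- stated objective: alternative
-- what changed: B replaces A's per-line startswith tests for the two header fields by a single pass that indexes every colon-containing header line in a dict (lowercased key before the first ':' mapped to the stripped value, later lines overwriting earlier ones) followed by two lookups; title and body are computed as before.
import Mathlib
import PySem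

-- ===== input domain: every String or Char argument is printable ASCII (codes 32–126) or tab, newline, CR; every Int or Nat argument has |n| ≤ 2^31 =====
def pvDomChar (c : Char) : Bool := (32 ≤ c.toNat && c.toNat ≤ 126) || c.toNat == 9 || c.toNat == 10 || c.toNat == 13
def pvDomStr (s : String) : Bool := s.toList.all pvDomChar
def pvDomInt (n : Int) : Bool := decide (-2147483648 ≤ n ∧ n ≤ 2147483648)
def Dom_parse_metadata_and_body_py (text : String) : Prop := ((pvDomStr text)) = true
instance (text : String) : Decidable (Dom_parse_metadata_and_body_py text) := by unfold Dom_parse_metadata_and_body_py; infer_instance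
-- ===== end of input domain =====

-- B replaces A's per-line prefix tests by one pass that indexes the header lines in a dict
-- (lowercased key before the first ':' → stripped value) and two lookups; same values, same cost class.
-- Ports are written on the List Char side via PySem.Chars (PySem.Str.f is Chars.f on .toList).

-- shared hand port of s.split(":", 1): exact for the one-character separator —
-- if ':' occurs, the part before the first ':' and everything after it; else the whole string
def pvSplitColon1 (cs : List Char) : List (List Char) :=
  if ':' ∈ cs then [cs.takeWhile (· != ':'), (cs.dropWhile (· != ':')).tail] else [cs]

-- [r.strip() for r in v.split(",") if r.strip()] (identical comprehension in both Pythons)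
def pvRoles (v : List Char) : List (List Char) :=
  ((PySem.Chars.splitOn v [',']).map PySem.Chars.strip).filter (fun r => !r.isEmpty)

-- ===== PORT A =====
-- the body of A's for-loop: two independent ifs updating (classification, allowed_roles)
def pvStepA (st : List Char × List (List Char)) (l : List Char) : List Char × List (List Char) :=
  let st1 := if PySem.Chars.startswith (PySem.Chars.lower l) "classification:".toList then
      (PySem.Chars.upper (PySem.Chars.strip ((pvSplitColon1 l).getD 1 [])), st.2)
    else st
  if PySem.Chars.startswith (PySem.Chars.lower l) "allowedroles:".toList then
    (st1.1, pvRoles (PySem.Chars.strip ((pvSplitColon1 l).getD 1 [])))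
  else st1

def parse_metadata_and_body_py (text : String) : String × String × List String × String :=
  let lines := (PySem.Chars.splitlines text.toList).map PySem.Chars.rstrip
  let title : List Char := match lines with
    | [] => "Untitled".toList
    | l0 :: _ => PySem.Chars.strip (l0.dropWhile (· == '#'))  -- lstrip("#"): drop leading '#' (hand port, exact)
  let st := (PySem.List.slice lines none (some 10)).foldl pvStepA ("INTERNAL".toList, ["employee".toList])
  (String.ofList title, String.ofList st.1, st.2.map String.ofList, String.ofList (PySem.Chars.join ['\n'] lines))

-- ===== PORT B =====
-- the body of B's for-loop: index the line by its lowercased key (dict overwrite = last match wins)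
def pvStepB (d : PySem.Dict (List Char) (List Char)) (l : List Char) : PySem.Dict (List Char) (List Char) :=
  if ':' ∈ l then
    d.insert (PySem.Chars.lower ((pvSplitColon1 l).getD 0 [])) (PySem.Chars.strip ((pvSplitColon1 l).getD 1 []))
  else d

def parse_metadata_and_body_py_alt (text : String) : String × String × List String × String :=
  let lines := (PySem.Chars.splitlines text.toList).map PySem.Chars.rstrip
  let md := (PySem.List.slice lines none (some 10)).foldl pvStepB (PySem.Dict.mk [])
  let title : List Char := match lines with
    | [] => "Untitled".toList
    | l0 :: _ => PySem.Chars.strip (l0.dropWhile (· == '#'))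
  let classification : List Char := match md.get? "classification".toList with
    | some v => PySem.Chars.upper v
    | none => "INTERNAL".toList
  let allowed_roles : List (List Char) := match md.get? "allowedroles".toList with
    | some v => pvRoles v
    | none => ["employee".toList]
  (String.ofList title, String.ofList classification, allowed_roles.map String.ofList, String.ofList (PySem.Chars.join ['\n'] lines))

-- ===== PRECONDITION & SPEC =====
def Spec_parse_metadata_and_body_py (text : String) (out : String × String × List String × String) : Prop := out = parse_metadata_and_body_py_alt text
instance (text : String) (out : String × String × List String × String) : Decidable (Spec_parse_metadata_and_body_py text out) := by unfold Spec_parse_metadata_and_body_py; infer_instance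

-- ===== CLAIM (what is proved, stated in full; the proofs are below) =====
def Claim_equal_parse_metadata_and_body_py : Prop := ∀ (text : String), Dom_parse_metadata_and_body_py text → Spec_parse_metadata_and_body_py text (parse_metadata_and_body_py text)

-- ===== LEMMAS AND PROOFS =====

-- reading A's loop state off B's dict
def pvInterp (d : PySem.Dict (List Char) (List Char)) (c : List Char) (r : List (List Char)) :
    List Char × List (List Char) :=
  ((match d.get? "classification".toList with
    | some v => PySem.Chars.upper v
    | none => c),
   (match d.get? "allowedroles".toList with
    | some v => pvRoles v
    | none => r))

lemma pv_lowerChar_eq_colon (c : Char) : PySem.Chars.lowerChar c = ':' ↔ c = ':' := by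
  unfold PySem.Chars.lowerChar PySem.Chars.isupper
  split_ifs with h
  · simp only [Bool.and_eq_true, decide_eq_true_eq] at h
    have h1 : 65 ≤ c.toNat := Nat.succ_le_of_lt h.1
    have h2 : c.toNat ≤ 90 := Nat.le_of_lt_succ (Nat.lt_succ_of_le h.2)
    constructor
    · intro hc
      exfalso
      have he := congrArg Char.toNat hc
      rw [Char.toNat_ofNat] at he
      have hv : (c.toNat + 32).isValidChar := Or.inl (by omega)
      rw [if_pos hv] at he
      have h3 : (':' : Char).toNat = 58 := by decide
      omega
    · intro hc
      subst hc
      exfalso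
      have h3 : (':' : Char).toNat = 58 := by decide
      omega
  · exact Iff.rfl

lemma pv_startswith_iff (p cs : List Char) (hp : ':' ∉ p) :
    PySem.Chars.startswith (PySem.Chars.lower cs) (p ++ [':']) = true ↔
      ':' ∈ cs ∧ PySem.Chars.lower (cs.takeWhile (· != ':')) = p := by
  have hcol : PySem.Chars.lowerChar ':' = ':' := by decide
  induction cs generalizing p with
  | nil =>
    simp only [PySem.Chars.lower, List.map_nil, PySem.Chars.startswith, List.not_mem_nil,
      false_and, iff_false]
    cases p <;> simp
  | cons c cs ih =>
    by_cases hc : c = ':'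
    · subst hc
      cases p with
      | nil =>
        simp [PySem.Chars.startswith, PySem.Chars.lower, List.isPrefixOf, hcol]
      | cons q p' =>
        have hq : q ≠ ':' := fun h => hp (h ▸ List.mem_cons_self ..)
        simp only [PySem.Chars.startswith, PySem.Chars.lower, List.map_cons, List.cons_append,
          List.isPrefixOf, Bool.and_eq_true, beq_iff_eq, hcol, List.takeWhile_cons]
        simp [hq]
    · have hne : (c != ':') = true := by simp [hc]
      have hlc : PySem.Chars.lowerChar c ≠ ':' := fun h => hc ((pv_lowerChar_eq_colon c).mp h)
      cases p with
      | nil =>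
        simp only [List.nil_append, PySem.Chars.startswith, PySem.Chars.lower, List.map_cons,
          List.isPrefixOf, Bool.and_eq_true, beq_iff_eq,
          List.takeWhile_cons, hne, if_true, List.mem_cons]
        simp [Ne.symm hlc]
      | cons q p' =>
        have hp' : ':' ∉ p' := fun h => hp (List.mem_cons_of_mem _ h)
        have hih := ih p' hp'
        simp only [PySem.Chars.startswith, PySem.Chars.lower, List.map_cons, List.cons_append,
          List.isPrefixOf, Bool.and_eq_true, beq_iff_eq, List.takeWhile_cons, hne, if_true,
          List.mem_cons] at hih ⊢
        constructor
        · rintro ⟨h1, h2⟩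
          have hmp := hih.mp h2
          exact ⟨Or.inr hmp.1, by rw [hmp.2, h1]⟩
        · rintro ⟨h1, h2⟩
          injection h2 with ha hb
          rcases h1 with h1 | h1
          · exact absurd h1.symm hc
          · exact ⟨ha.symm, hih.mpr ⟨h1, hb⟩⟩

-- s.split(":", 1) under ':' ∈ l, componentwise
lemma pv_split_mem (l : List Char) (hm : ':' ∈ l) :
    pvSplitColon1 l = [l.takeWhile (· != ':'), (l.dropWhile (· != ':')).tail] := by
  simp [pvSplitColon1, hm]

-- one step of the two loops preserves the reading of A's state off B's dict
lemma pv_step (l : List Char) (d : PySem.Dict (List Char) (List Char)) (c : List Char)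
    (r : List (List Char)) : pvStepA (pvInterp d c r) l = pvInterp (pvStepB d l) c r := by
  have eC : "classification".toList ++ [':'] = "classification:".toList := by decide
  have eA : "allowedroles".toList ++ [':'] = "allowedroles:".toList := by decide
  have iC := pv_startswith_iff "classification".toList l (by decide)
  have iA := pv_startswith_iff "allowedroles".toList l (by decide)
  rw [eC] at iC
  rw [eA] at iA
  by_cases hm : ':' ∈ l
  · have hk0 : (pvSplitColon1 l).getD 0 [] = l.takeWhile (· != ':') := by
      rw [pv_split_mem l hm]; rfl
    by_cases h1 : PySem.Chars.lower (l.takeWhile (· != ':')) = "classification".toList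
    · have hb1 : PySem.Chars.startswith (PySem.Chars.lower l) "classification:".toList = true :=
        iC.mpr ⟨hm, h1⟩
      have hb2 : PySem.Chars.startswith (PySem.Chars.lower l) "allowedroles:".toList = false := by
        rw [Bool.eq_false_iff]
        intro h
        have := (iA.mp h).2
        rw [h1] at this
        exact absurd this (by decide)
      simp only [pvStepA, pvStepB, hb1, hb2, if_pos hm, if_true, if_false, Bool.false_eq_true,
        pvInterp, hk0, h1, PySem.Dict.get?_insert_self,
        PySem.Dict.get?_insert_of_ne d _ (show "allowedroles".toList ≠ "classification".toList by decide)]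
    · by_cases h2 : PySem.Chars.lower (l.takeWhile (· != ':')) = "allowedroles".toList
      · have hb1 : PySem.Chars.startswith (PySem.Chars.lower l) "classification:".toList = false := by
          rw [Bool.eq_false_iff]
          exact fun h => h1 (iC.mp h).2
        have hb2 : PySem.Chars.startswith (PySem.Chars.lower l) "allowedroles:".toList = true :=
          iA.mpr ⟨hm, h2⟩
        simp only [pvStepA, pvStepB, hb1, hb2, if_pos hm, if_true, if_false, Bool.false_eq_true,
          pvInterp, hk0, h2, PySem.Dict.get?_insert_self,
          PySem.Dict.get?_insert_of_ne d _ (show "classification".toList ≠ "allowedroles".toList by decide)]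
      · have hb1 : PySem.Chars.startswith (PySem.Chars.lower l) "classification:".toList = false := by
          rw [Bool.eq_false_iff]
          exact fun h => h1 (iC.mp h).2
        have hb2 : PySem.Chars.startswith (PySem.Chars.lower l) "allowedroles:".toList = false := by
          rw [Bool.eq_false_iff]
          exact fun h => h2 (iA.mp h).2
        simp only [pvStepA, pvStepB, hb1, hb2, if_pos hm, if_false, Bool.false_eq_true,
          pvInterp, hk0,
          PySem.Dict.get?_insert_of_ne d _ (fun h => h1 h.symm),
          PySem.Dict.get?_insert_of_ne d _ (fun h => h2 h.symm)]
  · have hb1 : PySem.Chars.startswith (PySem.Chars.lower l) "classification:".toList = false := by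
      rw [Bool.eq_false_iff]
      exact fun h => hm (iC.mp h).1
    have hb2 : PySem.Chars.startswith (PySem.Chars.lower l) "allowedroles:".toList = false := by
      rw [Bool.eq_false_iff]
      exact fun h => hm (iA.mp h).1
    simp only [pvStepA, pvStepB, hb1, hb2, if_neg hm, if_false, Bool.false_eq_true]

lemma pv_fold (ls : List (List Char)) (d : PySem.Dict (List Char) (List Char)) (c : List Char)
    (r : List (List Char)) :
    ls.foldl pvStepA (pvInterp d c r) = pvInterp (ls.foldl pvStepB d) c r := by
  induction ls generalizing d with
  | nil => rfl
  | cons l ls ih => rw [List.foldl_cons, List.foldl_cons, pv_step, ih]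

-- ===== VERDICT (by name: the statement is the Claim_ definition above) =====
theorem parse_metadata_and_body_py_spec : Claim_equal_parse_metadata_and_body_py := by
  intro text _
  unfold Spec_parse_metadata_and_body_py parse_metadata_and_body_py parse_metadata_and_body_py_alt
  dsimp only
  have h := pv_fold
    (PySem.List.slice ((PySem.Chars.splitlines text.toList).map PySem.Chars.rstrip) none (some 10))
    (PySem.Dict.mk []) "INTERNAL".toList ["employee".toList]
  rw [show pvInterp (PySem.Dict.mk []) "INTERNAL".toList ["employee".toList]
      = ("INTERNAL".toList, ["employee".toList]) from rfl] at h
  rw [h]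
  rfl
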